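-- pv_equiv track=rewrite | github.com/rcrzlbrd/password-strength-classifier | src/features.py | has_consecutive
-- ===== SOURCE A (Python) =====
-- def has_consecutive(password: str, n: int = 3) -> int:
--     for i in range(len(password) - n + 1):
--         chunk = password[i:i + n]
--         if len(set(chunk)) == 1:
--             return 1
--         if all(ord(chunk[j+1]) - ord(chunk[j]) == 1 for j in range(n-1)):
--             return 1
--         if all(ord(chunk[j]) - ord(chunk[j+1]) == 1 for j in range(n-1)):
--             return 1
--     return 0
-- ===== SOURCE B (Python) =====
-- def has_consecutive(password: str, n: int = 3) -> int:
--     # Single pass over the characters, tracking the previous char code, the previous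
--     # adjacent difference and the length of the current run of equal small (-1/0/+1)
--     # differences; answers as soon as the run reaches n-1. O(L) worst case, and only
--     # O(position of first match) before an early exit (no upfront copy of the string).
--     if n <= 0:
--         return 1
--     if n == 1:
--         return 1 if password else 0
--     m = n - 1
--     run = 0
--     prev = None
--     prev_o = None
--     for ch in password:
--         o = ord(ch)
--         if prev_o is not None:
--             d = o - prev_o
--             if -1 <= d <= 1:
--                 run = run + 1 if d == prev else 1
--             else:
--                 run = 0
--             if run >= m:
--                 return 1
--             prev = d
--         prev_o = o
--     return 0
-- ===== Notes on version B (the rewrite author's own statement) =====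
-- stated objective: faster
-- what changed: Instead of rescanning a fresh length-n window at every position (building a set and two generator scans per window), B makes a single pass over adjacent-character differences keeping a run counter of consecutive equal small (-1/0/+1) diffs and answers as soon as the run reaches n-1.
import Mathlib
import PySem

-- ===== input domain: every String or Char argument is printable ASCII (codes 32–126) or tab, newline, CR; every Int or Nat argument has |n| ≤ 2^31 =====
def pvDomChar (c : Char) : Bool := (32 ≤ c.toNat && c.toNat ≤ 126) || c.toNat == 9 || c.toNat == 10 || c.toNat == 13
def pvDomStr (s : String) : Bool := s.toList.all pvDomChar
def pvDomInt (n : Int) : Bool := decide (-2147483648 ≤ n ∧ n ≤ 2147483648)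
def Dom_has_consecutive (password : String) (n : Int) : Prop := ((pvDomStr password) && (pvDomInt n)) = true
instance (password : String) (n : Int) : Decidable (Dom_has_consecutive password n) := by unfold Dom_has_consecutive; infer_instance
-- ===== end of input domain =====

-- B replaces A's length-n window rescans by a single pass over adjacent-character
-- differences, tracking the length of the current run of equal small (-1/0/+1) diffs.

-- ===== PORT A =====
-- literal port of A: for each window start i, slice the chunk and test the three
-- conditions (constant via set-size, ascending, descending) in A's order. pyGetD's
-- default is never used: wherever the generators are nonempty the chunk has length n
-- and the tested indices are in range (the Python never raises).
def pvCondA (cs : List Char) (n : Int) (i : Int) : Int :=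
  let chunk := PySem.List.slice cs (some i) (some (i + n))
  if (PySem.Set.ofList chunk).length = 1 then 1
  else if (PySem.List.pyRange 0 (n - 1) 1).all
      (fun j => ((PySem.List.pyGetD chunk (j + 1) ' ').toNat : Int)
                - ((PySem.List.pyGetD chunk j ' ').toNat : Int) == 1) then 1
  else if (PySem.List.pyRange 0 (n - 1) 1).all
      (fun j => ((PySem.List.pyGetD chunk j ' ').toNat : Int)
                - ((PySem.List.pyGetD chunk (j + 1) ' ').toNat : Int) == 1) then 1
  else 0

-- 'for i in range(len(password) - n + 1)' with early return, as recursion on the index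
-- (the range itself is not materialised, exactly like Python's lazy range)
def pvLoopA (cs : List Char) (n : Int) (hi : Int) (i : Int) : Int :=
  if h : i < hi then
    (if pvCondA cs n i = 1 then 1 else pvLoopA cs n hi (i + 1))
  else 0
termination_by (hi - i).toNat
decreasing_by omega

def has_consecutive (password : String) (n : Int) : Int :=
  pvLoopA password.toList n ((password.toList.length : Int) - n + 1) 0

-- ===== PORT B =====
-- port of B: one pass over the characters, carrying (run, previous diff, previous code)
def pvLoopB (m : Int) : List Char → Int → Option Int → Option Int → Int
  | [], _, _, _ => 0
  | ch :: rest, run, prev, prevO =>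
      let o : Int := (ch.toNat : Int)
      match prevO with
      | none => pvLoopB m rest run prev (some o)
      | some po =>
          let d : Int := o - po
          let run' : Int := if -1 ≤ d ∧ d ≤ 1 then (if some d = prev then run + 1 else 1) else 0
          if m ≤ run' then 1 else pvLoopB m rest run' (some d) (some o)

def has_consecutive_alt (password : String) (n : Int) : Int :=
  if n ≤ 0 then 1
  else if n = 1 then (if password.toList.isEmpty then 0 else 1)
  else pvLoopB (n - 1) password.toList 0 none none

-- ===== PRECONDITION & SPEC =====
def Spec_has_consecutive (password : String) (n : Int) (out : Int) : Prop := out = has_consecutive_alt password n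
instance (password : String) (n : Int) (out : Int) : Decidable (Spec_has_consecutive password n out) := by unfold Spec_has_consecutive; infer_instance

-- ===== CLAIM (what is proved, stated in full; the proofs are below) =====
def Claim_equal_has_consecutive : Prop := ∀ (password : String) (n : Int), Dom_has_consecutive password n → Spec_has_consecutive password n (has_consecutive password n)

-- ===== LEMMAS AND PROOFS =====

-- the list of adjacent differences ord(cs[k+1]) - ord(cs[k])
def pvDiffs (cs : List Char) : List Int :=
  (cs.zip cs.tail).map (fun p => ((p.2.toNat : Int) - (p.1.toNat : Int)))

-- proof-side twin of pvLoopB working on the diff list directly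
def pvLoopD (m : Int) : List Int → Int → Option Int → Int
  | [], _, _ => 0
  | d :: rest, run, prev =>
      let run' : Int := if -1 ≤ d ∧ d ≤ 1 then (if some d = prev then run + 1 else 1) else 0
      if m ≤ run' then 1 else pvLoopD m rest run' (some d)

theorem pvDiffs_cons_cons (a b : Char) (t : List Char) :
    pvDiffs (a :: b :: t) = ((b.toNat : Int) - (a.toNat : Int)) :: pvDiffs (b :: t) := rfl

theorem pvLoopB_eq_loopD_aux (m : Int) (cs : List Char) :
    ∀ (c : Char) (run : Int) (prev : Option Int),
      pvLoopB m cs run prev (some (c.toNat : Int)) = pvLoopD m (pvDiffs (c :: cs)) run prev := by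
  induction cs with
  | nil => intro c run prev; rfl
  | cons ch rest ih =>
      intro c run prev
      rw [pvDiffs_cons_cons]
      simp only [pvLoopB, pvLoopD]
      split_ifs <;> simp [ih ch]

theorem pvLoopB_eq_loopD (m : Int) (cs : List Char) :
    pvLoopB m cs 0 none none = pvLoopD m (pvDiffs cs) 0 none := by
  cases cs with
  | nil => rfl
  | cons c rest => simpa only [pvLoopB] using pvLoopB_eq_loopD_aux m rest c 0 none

theorem pvLoopD_eq_zero_or_one (m : Int) (ds : List Int) (run : Int) (prev : Option Int) :
    pvLoopD m ds run prev = 0 ∨ pvLoopD m ds run prev = 1 := by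
  induction ds generalizing run prev with
  | nil => left; rfl
  | cons d rest ih => simp only [pvLoopD]; split_ifs <;> simp [ih]

theorem pvLoopA_eq_zero_or_one (cs : List Char) (n : Int) (hi i : Int) :
    pvLoopA cs n hi i = 0 ∨ pvLoopA cs n hi i = 1 := by
  generalize hk : (hi - i).toNat = k
  induction k generalizing i with
  | zero => rw [pvLoopA, dif_neg (by omega)]; left; rfl
  | succ k ih =>
      rw [pvLoopA]
      split_ifs with h hc
      · right; rfl
      · exact ih (i + 1) (by omega)
      · left; rfl

theorem pvLoopA_one_iff (cs : List Char) (n : Int) (hi i : Int) :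
    pvLoopA cs n hi i = 1 ↔ ∃ j : Int, i ≤ j ∧ j < hi ∧ pvCondA cs n j = 1 := by
  generalize hk : (hi - i).toNat = k
  induction k generalizing i with
  | zero =>
      rw [pvLoopA, dif_neg (by omega)]
      constructor
      · intro h; exact absurd h (by norm_num)
      · rintro ⟨j, h1, h2, -⟩; exfalso; omega
  | succ k ih =>
      rw [pvLoopA]
      split_ifs with h hc
      · exact ⟨fun _ => ⟨i, le_refl i, h, hc⟩, fun _ => rfl⟩
      · rw [ih (i + 1) (by omega)]
        constructor
        · rintro ⟨j, h1, h2, h3⟩; exact ⟨j, by omega, h2, h3⟩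
        · rintro ⟨j, h1, h2, h3⟩
          refine ⟨j, ?_, h2, h3⟩
          rcases eq_or_lt_of_le h1 with rfl | hlt
          · exact absurd h3 hc
          · omega
      · exfalso; omega

-- key characterisation of B's loop: it answers 1 exactly when either the seeded run
-- extends to length ≥ m, or the tail contains a fresh constant small segment of length m
theorem pvLoopD_one_iff (m : Int) (hm : 1 ≤ m) (ds : List Int) (run : Int) (hrun : 0 ≤ run) (prev : Option Int) :
    pvLoopD m ds run prev = 1 ↔
      ((∃ j : Nat, 1 ≤ j ∧ (∃ v, prev = some v ∧ (-1 ≤ v ∧ v ≤ 1) ∧ ds.take j = List.replicate j v) ∧ m ≤ run + j)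
       ∨ (∃ i : Nat, ∃ v, (-1 ≤ v ∧ v ≤ 1) ∧ (ds.drop i).take m.toNat = List.replicate m.toNat v)) := by
  induction ds generalizing run prev with
  | nil =>
      simp only [pvLoopD, List.take_nil, List.drop_nil]
      constructor
      · intro h; exact absurd h (by norm_num)
      · rintro (⟨j, hj, ⟨v, _, _, htake⟩, _⟩ | ⟨i, v, _, htake⟩)
        · have := congrArg List.length htake; simp at this; omega
        · have := congrArg List.length htake; simp at this; omega
  | cons d rest ih =>
      simp only [pvLoopD]
      by_cases hd : (-1 ≤ d ∧ d ≤ 1)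
      · by_cases hp : some d = prev
        · simp only [if_pos hd, if_pos hp]
          split_ifs with hle
          · constructor
            · intro _
              exact Or.inl ⟨1, le_refl 1, ⟨d, hp.symm, hd, by simp⟩, by push_cast; omega⟩
            · intro _; rfl
          · rw [ih (run + 1) (by omega) (some d)]
            constructor
            · rintro (⟨j, hj, ⟨v, hv, hsm, htake⟩, hle2⟩ | ⟨i, v, hsm, htake⟩)
              · obtain rfl : v = d := by injection hv.symm
                refine Or.inl ⟨j + 1, by omega, ⟨v, hp.symm, hd, ?_⟩, by push_cast at *; omega⟩
                simp [List.replicate_succ, htake]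
              · exact Or.inr ⟨i + 1, v, hsm, htake⟩
            · rintro (⟨j, hj, ⟨v, hv, hsm, htake⟩, hle2⟩ | ⟨i, v, hsm, htake⟩)
              · obtain rfl : prev = some v := hv
                obtain rfl : d = v := by injection hp
                obtain ⟨j', rfl⟩ : ∃ j', j = j' + 1 := ⟨j - 1, by omega⟩
                simp only [List.take_succ_cons, List.replicate_succ, List.cons.injEq] at htake
                rcases Nat.eq_zero_or_pos j' with rfl | hj'
                · exfalso; push_cast at hle2; omega
                · exact Or.inl ⟨j', by omega, ⟨d, rfl, hd, htake.2⟩, by push_cast at *; omega⟩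
              · rcases i with _ | i'
                · have hmt : m.toNat = (m.toNat - 1) + 1 := by omega
                  rw [hmt] at htake
                  simp only [List.drop_zero, List.take_succ_cons, List.replicate_succ,
                    List.cons.injEq] at htake
                  obtain ⟨rfl, htake2⟩ := htake
                  rcases Nat.eq_zero_or_pos (m.toNat - 1) with hz | hpos
                  · exfalso; omega
                  · refine Or.inl ⟨m.toNat - 1, by omega, ⟨d, rfl, hd, htake2⟩, by omega⟩
                · exact Or.inr ⟨i', v, hsm, htake⟩
        · simp only [if_pos hd, if_neg hp]
          split_ifs with hle
          · constructor
            · intro _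
              have hm1 : m = 1 := by omega
              refine Or.inr ⟨0, d, hd, ?_⟩
              simp [hm1]
            · intro _; rfl
          · rw [ih 1 (by omega) (some d)]
            constructor
            · rintro (⟨j, hj, ⟨v, hv, hsm, htake⟩, hle2⟩ | ⟨i, v, hsm, htake⟩)
              · obtain rfl : v = d := by injection hv.symm
                refine Or.inr ⟨0, v, hd, ?_⟩
                have hmj : m.toNat - 1 ≤ j := by omega
                have hpre : rest.take (m.toNat - 1) = List.replicate (m.toNat - 1) v := by
                  have h2 := congrArg (List.take (m.toNat - 1)) htake
                  rwa [List.take_take, List.take_replicate, min_eq_left hmj] at h2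
                have hmt : m.toNat = (m.toNat - 1) + 1 := by omega
                rw [List.drop_zero, hmt, List.take_succ_cons, List.replicate_succ, hpre]
              · exact Or.inr ⟨i + 1, v, hsm, htake⟩
            · rintro (⟨j, hj, ⟨v, hv, hsm, htake⟩, hle2⟩ | ⟨i, v, hsm, htake⟩)
              · obtain rfl : prev = some v := hv
                obtain ⟨j', rfl⟩ : ∃ j', j = j' + 1 := ⟨j - 1, by omega⟩
                simp only [List.take_succ_cons, List.replicate_succ, List.cons.injEq] at htake
                exact absurd (congrArg some htake.1) hp
              · rcases i with _ | i'
                · have hmt : m.toNat = (m.toNat - 1) + 1 := by omega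
                  rw [hmt] at htake
                  simp only [List.drop_zero, List.take_succ_cons, List.replicate_succ,
                    List.cons.injEq] at htake
                  obtain ⟨rfl, htake2⟩ := htake
                  exact Or.inl ⟨m.toNat - 1, by omega, ⟨d, rfl, hd, htake2⟩, by omega⟩
                · exact Or.inr ⟨i', v, hsm, htake⟩
      · simp only [if_neg hd]
        rw [if_neg (by omega)]
        rw [ih 0 (le_refl 0) (some d)]
        constructor
        · rintro (⟨j, hj, ⟨v, hv, hsm, htake⟩, hle2⟩ | ⟨i, v, hsm, htake⟩)
          · obtain rfl : v = d := by injection hv.symm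
            exact absurd hsm hd
          · exact Or.inr ⟨i + 1, v, hsm, htake⟩
        · rintro (⟨j, hj, ⟨v, hv, hsm, htake⟩, hle2⟩ | ⟨i, v, hsm, htake⟩)
          · obtain rfl : prev = some v := hv
            obtain ⟨j', rfl⟩ : ∃ j', j = j' + 1 := ⟨j - 1, by omega⟩
            simp only [List.take_succ_cons, List.replicate_succ, List.cons.injEq] at htake
            obtain rfl := htake.1
            exact absurd hsm hd
          · rcases i with _ | i'
            · have hmt : m.toNat = (m.toNat - 1) + 1 := by omega
              rw [hmt] at htake
              simp only [List.drop_zero, List.take_succ_cons, List.replicate_succ,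
                List.cons.injEq] at htake
              obtain ⟨rfl, _⟩ := htake
              exact absurd hsm hd
            · exact Or.inr ⟨i', v, hsm, htake⟩

theorem pvDiffs_length (cs : List Char) : (pvDiffs cs).length = cs.length - 1 := by
  simp [pvDiffs, List.length_zip, List.length_tail]

theorem pvDiffs_getElem? (cs : List Char) (k : Nat) (h : k + 1 < cs.length) :
    (pvDiffs cs)[k]? = some (((cs[k+1]'h).toNat : Int) - ((cs[k]'(by omega)).toNat : Int)) := by
  have hk : k < (pvDiffs cs).length := by rw [pvDiffs_length]; omega
  rw [List.getElem?_eq_getElem hk]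
  simp only [pvDiffs, List.getElem_map, List.getElem_zip, List.getElem_tail]

theorem pvSeg_iff {α : Type} (l : List α) (i m : Nat) (v : α) (hm : 1 ≤ m) :
    (l.drop i).take m = List.replicate m v ↔
      i + m ≤ l.length ∧ ∀ j, j < m → l[i+j]? = some v := by
  constructor
  · intro h
    have hl := congrArg List.length h
    simp only [List.length_take, List.length_drop, List.length_replicate] at hl
    refine ⟨by omega, fun j hj => ?_⟩
    have := congrArg (fun t => t[j]?) h
    simp only at this
    rw [List.getElem?_take_of_lt hj, List.getElem?_drop] at this
    rw [this, List.getElem?_replicate, if_pos hj]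
  · rintro ⟨hb, hj⟩
    apply List.ext_getElem?
    intro j
    by_cases hjm : j < m
    · rw [List.getElem?_take_of_lt hjm, List.getElem?_drop, hj j hjm,
        List.getElem?_replicate, if_pos hjm]
    · rw [List.getElem?_eq_none (by simp; omega), List.getElem?_eq_none (by simp; omega)]

-- "every adjacent difference inside the window starting at k of width N equals v"
def pvW (cs : List Char) (k N : Nat) (v : Int) : Prop :=
  ∀ j : Nat, j < N - 1 → ((cs.getD (k+j+1) ' ').toNat : Int) - ((cs.getD (k+j) ' ').toNat : Int) = v

theorem pvSeg_iff_W (cs : List Char) (k N : Nat) (v : Int) (h2 : 2 ≤ N) (hb : k + N ≤ cs.length) :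
    ((pvDiffs cs).drop k).take (N-1) = List.replicate (N-1) v ↔ pvW cs k N v := by
  rw [pvSeg_iff _ _ _ _ (by omega)]
  have hbd : k + (N - 1) ≤ (pvDiffs cs).length := by rw [pvDiffs_length]; omega
  constructor
  · rintro ⟨-, h⟩ j hj
    have hcs : k + j + 1 < cs.length := by omega
    have := h j hj
    rw [pvDiffs_getElem? cs (k+j) (by omega)] at this
    have heq := Option.some.inj this
    rw [List.getD_eq_getElem _ _ (by omega : k + j + 1 < cs.length),
        List.getD_eq_getElem _ _ (by omega : k + j < cs.length)]
    omega
  · intro h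
    refine ⟨hbd, fun j hj => ?_⟩
    rw [pvDiffs_getElem? cs (k+j) (by omega)]
    have := h j hj
    rw [List.getD_eq_getElem _ _ (by omega : k + j + 1 < cs.length),
        List.getD_eq_getElem _ _ (by omega : k + j < cs.length)] at this
    simp only [Option.some.injEq]
    omega

theorem pvChunk_get (cs : List Char) (k N : Nat) (hb : k + N ≤ cs.length) (j : Int) (h0 : 0 ≤ j) (hj : j < (N : Int)) :
    PySem.List.pyGetD ((cs.drop k).take N) j ' ' = cs.getD (k + j.toNat) ' ' := by
  have hlen : ((cs.drop k).take N).length = N := by simp; omega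
  rw [PySem.List.pyGetD_eq_getElem _ ' ' h0 (by rw [hlen]; exact hj)]
  rw [List.getElem_take, List.getElem_drop]
  rw [List.getD_eq_getElem _ _ (by omega : k + j.toNat < cs.length)]

theorem pvChar_toNat_inj (a b : Char) (h : a.toNat = b.toNat) : a = b := by
  apply Char.ext; exact UInt32.toNat_inj.mp h

theorem pvSet_replicate (c : Char) (m : Nat) : PySem.Set.ofList (List.replicate (m+1) c) = [c] := by
  rw [List.replicate_succ, PySem.Set.ofList_cons]
  have h : PySem.Set.discard (PySem.Set.ofList (List.replicate m c)) c = [] := by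
    rw [List.eq_nil_iff_forall_not_mem]
    intro y hy
    rw [PySem.Set.mem_discard] at hy
    exact hy.2 (List.eq_of_mem_replicate ((PySem.Set.mem_ofList _ _).mp hy.1))
  rw [h]

theorem pvSet_len_one (l : List Char) (h : (PySem.Set.ofList l).length = 1) :
    ∀ b ∈ l, ∀ b' ∈ l, b = b' := by
  obtain ⟨a, ha⟩ := List.length_eq_one_iff.mp h
  intro b hb b' hb'
  have h1 := (PySem.Set.mem_ofList _ _).mpr hb
  have h2 := (PySem.Set.mem_ofList _ _).mpr hb'
  rw [ha] at h1 h2; simp at h1 h2; rw [h1, h2]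

theorem pvCondA_one_iff (cs : List Char) (n i : Int) (hn : 2 ≤ n) (hi : 0 ≤ i)
    (hib : i + n ≤ (cs.length : Int)) :
    (pvCondA cs n i = 1) ↔ ∃ v, (-1 ≤ v ∧ v ≤ 1) ∧
      ((pvDiffs cs).drop i.toNat).take ((n-1).toNat) = List.replicate ((n-1).toNat) v := by
  have hN2 : 2 ≤ n.toNat := by omega
  have hbk : i.toNat + n.toNat ≤ cs.length := by omega
  have hslice : PySem.List.slice cs (some i) (some (i+n)) = (cs.drop i.toNat).take n.toNat := by
    rw [PySem.List.slice_toNat cs hi (by omega)]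
    congr 1
    omega
  have hm1 : (n-1).toNat = n.toNat - 1 := by omega
  have hlen : ((cs.drop i.toNat).take n.toNat).length = n.toNat := by simp; omega
  have hB : (∀ j ∈ PySem.List.pyRange 0 (n - 1) 1,
        (((PySem.List.pyGetD ((cs.drop i.toNat).take n.toNat) (j + 1) ' ').toNat : Int)
          - ((PySem.List.pyGetD ((cs.drop i.toNat).take n.toNat) j ' ').toNat : Int) == 1) = true)
      ↔ pvW cs i.toNat n.toNat 1 := by
    constructor
    · intro h j hj
      have hmem : (j : Int) ∈ PySem.List.pyRange 0 (n - 1) 1 :=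
        (PySem.List.mem_pyRange_one).mpr ⟨by positivity, by omega⟩
      have hh := h _ hmem
      rw [beq_iff_eq] at hh
      rw [pvChunk_get cs i.toNat n.toNat hbk ((j:Int)+1) (by positivity) (by omega),
          pvChunk_get cs i.toNat n.toNat hbk (j:Int) (by positivity) (by omega)] at hh
      have e1 : ((j:Int)+1).toNat = j + 1 := by omega
      have e2 : ((j:Int)).toNat = j := by omega
      rw [e1, e2] at hh
      convert hh using 3 <;> omega
    · intro h j hj
      rw [PySem.List.mem_pyRange_one] at hj
      rw [beq_iff_eq]
      rw [pvChunk_get cs i.toNat n.toNat hbk (j+1) (by omega) (by omega),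
          pvChunk_get cs i.toNat n.toNat hbk j (by omega) (by omega)]
      have hh := h j.toNat (by omega)
      have e1 : (j+1).toNat = j.toNat + 1 := by omega
      rw [e1]
      convert hh using 3 <;> omega
  have hC : (∀ j ∈ PySem.List.pyRange 0 (n - 1) 1,
        (((PySem.List.pyGetD ((cs.drop i.toNat).take n.toNat) j ' ').toNat : Int)
          - ((PySem.List.pyGetD ((cs.drop i.toNat).take n.toNat) (j + 1) ' ').toNat : Int) == 1) = true)
      ↔ pvW cs i.toNat n.toNat (-1) := by
    constructor
    · intro h j hj
      have hmem : (j : Int) ∈ PySem.List.pyRange 0 (n - 1) 1 :=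
        (PySem.List.mem_pyRange_one).mpr ⟨by positivity, by omega⟩
      have hh := h _ hmem
      rw [beq_iff_eq] at hh
      rw [pvChunk_get cs i.toNat n.toNat hbk ((j:Int)+1) (by positivity) (by omega),
          pvChunk_get cs i.toNat n.toNat hbk (j:Int) (by positivity) (by omega)] at hh
      have e1 : ((j:Int)+1).toNat = j + 1 := by omega
      have e2 : ((j:Int)).toNat = j := by omega
      rw [e1, e2] at hh
      have h4 : ((cs.getD (i.toNat + j) ' ').toNat : Int) - ((cs.getD (i.toNat + (j+1)) ' ').toNat : Int) = 1 := by
        convert hh using 3 <;> omega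
      have e3 : i.toNat + (j + 1) = i.toNat + j + 1 := by omega
      rw [e3] at h4
      omega
    · intro h j hj
      rw [PySem.List.mem_pyRange_one] at hj
      rw [beq_iff_eq]
      rw [pvChunk_get cs i.toNat n.toNat hbk (j+1) (by omega) (by omega),
          pvChunk_get cs i.toNat n.toNat hbk j (by omega) (by omega)]
      have hh := h j.toNat (by omega)
      have e1 : (j+1).toNat = j.toNat + 1 := by omega
      have e2 : i.toNat + (j.toNat + 1) = i.toNat + j.toNat + 1 := by omega
      rw [e1, e2]
      omega
  have hA : (PySem.Set.ofList ((cs.drop i.toNat).take n.toNat)).length = 1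
      ↔ pvW cs i.toNat n.toNat 0 := by
    constructor
    · intro h j hj
      have heq := pvSet_len_one _ h
      have hj1 : j + 1 < n.toNat := by omega
      have hg1 : ((cs.drop i.toNat).take n.toNat)[j+1]'(by omega) ∈ (cs.drop i.toNat).take n.toNat :=
        List.getElem_mem (by omega)
      have hg2 : ((cs.drop i.toNat).take n.toNat)[j]'(by omega) ∈ (cs.drop i.toNat).take n.toNat :=
        List.getElem_mem (by omega)
      have := heq _ hg1 _ hg2
      rw [List.getElem_take, List.getElem_drop, List.getElem_take, List.getElem_drop] at this
      have e : i.toNat + j + 1 = i.toNat + (j + 1) := by omega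
      rw [e]
      rw [List.getD_eq_getElem _ _ (by omega : i.toNat + (j + 1) < cs.length),
          List.getD_eq_getElem _ _ (by omega : i.toNat + j < cs.length)]
      rw [this]
      omega
    · intro h
      have hstep : ∀ j, j < n.toNat → cs.getD (i.toNat + j) ' ' = cs.getD i.toNat ' ' := by
        intro j
        induction j with
        | zero => intro _; rfl
        | succ jj ih =>
            intro hjj
            have hw := h jj (by omega)
            have hstep1 : cs.getD (i.toNat + jj + 1) ' ' = cs.getD (i.toNat + jj) ' ' := by
              apply pvChar_toNat_inj
              omega
            have e : i.toNat + (jj + 1) = i.toNat + jj + 1 := by omega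
            rw [e, hstep1, ih (by omega)]
      have hchunk : (cs.drop i.toNat).take n.toNat
          = List.replicate n.toNat (cs.getD i.toNat ' ') := by
        rw [List.eq_replicate_iff]
        refine ⟨hlen, fun b hb => ?_⟩
        obtain ⟨j, hjlt, hjb⟩ := List.mem_iff_getElem.mp hb
        rw [List.getElem_take, List.getElem_drop] at hjb
        rw [← hjb, ← hstep j (by omega)]
        rw [List.getD_eq_getElem _ _ (by omega : i.toNat + j < cs.length)]
      rw [hchunk]
      have e : n.toNat = (n.toNat - 1) + 1 := by omega
      rw [e, pvSet_replicate]
      rfl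
  have hseg : ∀ v : Int, (((pvDiffs cs).drop i.toNat).take ((n-1).toNat)
        = List.replicate ((n-1).toNat) v) ↔ pvW cs i.toNat n.toNat v := by
    intro v
    rw [hm1]
    exact pvSeg_iff_W cs i.toNat n.toNat v hN2 hbk
  simp only [pvCondA]
  rw [hslice]
  simp only [List.all_eq_true]
  split_ifs with h1 h2 h3
  · simp only [true_iff]
    exact ⟨0, by norm_num, (hseg 0).mpr (hA.mp h1)⟩
  · simp only [true_iff]
    exact ⟨1, by norm_num, (hseg 1).mpr (hB.mp h2)⟩
  · simp only [true_iff]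
    exact ⟨-1, by norm_num, (hseg (-1)).mpr (hC.mp h3)⟩
  · constructor
    · intro h; exact absurd h (by norm_num)
    · rintro ⟨v, ⟨hv1, hv2⟩, hs⟩
      interval_cases v
      · exact absurd (hC.mpr ((hseg (-1)).mp hs)) h3
      · exact absurd (hA.mpr ((hseg 0).mp hs)) h1
      · exact absurd (hB.mpr ((hseg 1).mp hs)) h2

-- A's whole scan, for n ≥ 2, finds exactly a small-valued constant segment in the diff list
theorem pvA_one_iff (cs : List Char) (n : Int) (hn : 2 ≤ n) :
    pvLoopA cs n ((cs.length : Int) - n + 1) 0 = 1 ↔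
      ∃ (k : Nat) (v : Int), (-1 ≤ v ∧ v ≤ 1) ∧
        ((pvDiffs cs).drop k).take ((n-1).toNat) = List.replicate ((n-1).toNat) v := by
  rw [pvLoopA_one_iff]
  constructor
  · rintro ⟨i, h0i, hihi, hcond⟩
    obtain ⟨v, hv, hseg⟩ := (pvCondA_one_iff cs n i hn h0i (by omega)).mp hcond
    exact ⟨i.toNat, v, hv, hseg⟩
  · rintro ⟨k, v, hv, hseg⟩
    have hlen := congrArg List.length hseg
    simp only [List.length_take, List.length_drop, List.length_replicate,
      pvDiffs_length] at hlen
    have hk : (k : Int) + n ≤ (cs.length : Int) := by omega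
    refine ⟨(k : Int), by positivity, by omega, ?_⟩
    rw [pvCondA_one_iff cs n (k : Int) hn (by positivity) hk]
    exact ⟨v, hv, by rwa [Int.toNat_natCast]⟩

-- ===== VERDICT (by name: the statement is the Claim_ definition above) =====
theorem has_consecutive_spec : Claim_equal_has_consecutive := by
  unfold Claim_equal_has_consecutive Spec_has_consecutive
  intro p n _
  unfold has_consecutive has_consecutive_alt
  by_cases h0 : n ≤ 0
  · rw [if_pos h0]
    rw [pvLoopA, dif_pos (by omega : (0:Int) < (p.toList.length : Int) - n + 1)]
    rw [if_pos]
    unfold pvCondA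
    rw [PySem.List.pyRange_one_eq_nil (by omega : n - 1 ≤ 0)]
    simp
  · by_cases h1 : n = 1
    · subst h1
      rw [if_neg h0, if_pos rfl]
      cases hcs : p.toList with
      | nil =>
          rw [pvLoopA, dif_neg (by simp)]
          simp
      | cons c t =>
          simp only [List.isEmpty_cons]
          rw [if_neg (by simp)]
          rw [pvLoopA, dif_pos (by simp : (0:Int) < (((c :: t).length : Int) - 1 + 1))]
          rw [if_pos]
          unfold pvCondA
          have hsl : PySem.List.slice (c :: t) (some 0) (some (0 + 1)) = [c] := by
            rw [PySem.List.slice_toNat _ (le_refl 0) (by omega)]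
            rfl
          rw [hsl]
          rw [if_pos]
          have : PySem.Set.ofList [c] = [c] := pvSet_replicate c 0
          rw [this]
          rfl
    · have hn : 2 ≤ n := by omega
      rw [if_neg h0, if_neg h1]
      have hBD : pvLoopB (n - 1) p.toList 0 none none
          = pvLoopD (n - 1) (pvDiffs p.toList) 0 none :=
        pvLoopB_eq_loopD (n - 1) p.toList
      rw [hBD]
      have hiff : pvLoopA p.toList n ((p.toList.length : Int) - n + 1) 0 = 1
          ↔ pvLoopD (n - 1) (pvDiffs p.toList) 0 none = 1 := by
        rw [pvA_one_iff p.toList n hn,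
            pvLoopD_one_iff (n - 1) (by omega) (pvDiffs p.toList) 0 (le_refl 0) none]
        constructor
        · rintro ⟨k, v, hv, hseg⟩
          exact Or.inr ⟨k, v, hv, hseg⟩
        · rintro (⟨j, hj, ⟨v, hv, -⟩, -⟩ | ⟨i, v, hv, hseg⟩)
          · exact absurd hv (by simp)
          · exact ⟨i, v, hv, hseg⟩
      rcases pvLoopA_eq_zero_or_one p.toList n ((p.toList.length : Int) - n + 1) 0 with hA0 | hA1
      · rcases pvLoopD_eq_zero_or_one (n - 1) (pvDiffs p.toList) 0 none with hB0 | hB1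
        · rw [hA0, hB0]
        · exact absurd (hiff.mpr hB1) (by omega)
      · rw [hA1, hiff.mp hA1]
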